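-- pv_equiv track=rewrite | github.com/gunnarx/ifex | ifex/input_filters/omgidl/omgidl_to_ifex.py | translate_type
-- ===== SOURCE A (Python) =====
-- _type_map = {
--     # Exact OMG IDL primitive type names → IFEX fundamental types
--     "boolean":            "boolean",
--     "octet":              "uint8",
--     "char":               "uint8",
--     "wchar":              "uint8",
--     "short":              "int16",
--     "unsigned short":     "uint16",
--     "long":               "int32",
--     "unsigned long":      "uint32",
--     "long long":          "int64",
--     "unsigned long long": "uint64",
--     "float":              "float",
--     "double":             "double",
--     "long double":        "double",   # IFEX has no extended precision
--     "string":             "string",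
--     "wstring":            "string",
--     "any":                "opaque",
--     "Object":             "opaque",
--     "void":               "void",     # internal sentinel
-- }
--
-- def translate_type(t: str) -> str:
--     """Map an OMG IDL type string to an IFEX type string.
--
--     Handles:
--     - Primitive types via _type_map
--     - Array types: "long[3]" → "int32[]"  (size information is lost)
--     - Sequence types: "sequence<float>" → "float[]"
--                       "sequence<float,10>" → "float[]"  (bound lost)
--     - Unknown / user-defined types pass through unchanged.
--     """
--     # sequence<T> or sequence<T,N>
--     if t.startswith("sequence<"):
--         inner = t[len("sequence<"):].rstrip(">")
--         # strip optional bound ",N"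
--         elem_type = inner.split(",")[0].strip()
--         return translate_type(elem_type) + "[]"
--
--     # Fixed-size array: "long[3]" — strip the [N] suffix
--     if "[" in t:
--         base = t[:t.index("[")].strip()
--         return translate_type(base) + "[]"
--
--     return _type_map.get(t, t)
-- ===== SOURCE B (Python) =====
-- _type_map = {
--     "boolean":            "boolean",
--     "octet":              "uint8",
--     "char":               "uint8",
--     "wchar":              "uint8",
--     "short":              "int16",
--     "unsigned short":     "uint16",
--     "long":               "int32",
--     "unsigned long":      "uint32",
--     "long long":          "int64",
--     "unsigned long long": "uint64",
--     "float":              "float",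
--     "double":             "double",
--     "long double":        "double",
--     "string":             "string",
--     "wstring":            "string",
--     "any":                "opaque",
--     "Object":             "opaque",
--     "void":               "void",
-- }
--
-- def translate_type(t: str) -> str:
--     count = 0
--     while True:
--         if t.startswith("sequence<"):
--             t = t[len("sequence<"):].rstrip(">").split(",")[0].strip()
--         elif "[" in t:
--             t = t[:t.index("[")].strip()
--         else:
--             break
--         count += 1
--     return _type_map.get(t, t) + "[]" * count
-- ===== Notes on version B (the rewrite author's own statement) =====
-- stated objective: alternative
-- what changed: Replaced A's tail recursion (each level appending "[]" on return) with a flat while-loop that peels one type layer per iteration while counting, then does a single map lookup plus "[]" * count.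
import Mathlib
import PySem

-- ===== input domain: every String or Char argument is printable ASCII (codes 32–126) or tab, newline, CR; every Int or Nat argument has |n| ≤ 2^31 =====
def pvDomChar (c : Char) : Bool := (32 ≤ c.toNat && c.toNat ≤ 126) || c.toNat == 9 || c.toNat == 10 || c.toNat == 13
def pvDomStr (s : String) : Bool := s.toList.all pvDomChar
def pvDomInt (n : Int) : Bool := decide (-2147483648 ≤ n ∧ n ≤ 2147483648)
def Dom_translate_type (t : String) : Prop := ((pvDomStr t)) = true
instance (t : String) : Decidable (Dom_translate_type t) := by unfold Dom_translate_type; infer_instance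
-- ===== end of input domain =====

-- B replaces A's tail recursion by a flat unwrapping loop that counts peeled layers
-- and appends "[]" * count once at the end (objective: alternative decomposition).


-- shared module constant _type_map
def tmap : PySem.Dict (List Char) (List Char) := PySem.Dict.ofList [
  ("boolean".toList, "boolean".toList), ("octet".toList, "uint8".toList),
  ("char".toList, "uint8".toList), ("wchar".toList, "uint8".toList),
  ("short".toList, "int16".toList), ("unsigned short".toList, "uint16".toList),
  ("long".toList, "int32".toList), ("unsigned long".toList, "uint32".toList),
  ("long long".toList, "int64".toList), ("unsigned long long".toList, "uint64".toList),
  ("float".toList, "float".toList), ("double".toList, "double".toList),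
  ("long double".toList, "double".toList), ("string".toList, "string".toList),
  ("wstring".toList, "string".toList), ("any".toList, "opaque".toList),
  ("Object".toList, "opaque".toList), ("void".toList, "void".toList)]

-- hand port of s.rstrip(">") (PySem has no rstrip-with-chars); exact: drops exactly the trailing '>' run
def rstripGt (cs : List Char) : List Char := (cs.reverse.dropWhile (· == '>')).reverse

-- ===== PORT A =====
-- A's recursion, made total with fuel (length+1 suffices: each peel strictly shortens t)
def goA : Nat → List Char → List Char
  | 0, t => tmap.getD t t
  | f + 1, t =>
    if PySem.Chars.startswith t "sequence<".toList then
      -- inner = t[len("sequence<"):].rstrip(">"); elem = inner.split(",")[0].strip()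
      let inner := rstripGt (t.drop 9)
      let elem := PySem.Chars.strip ((PySem.Chars.splitOn inner [',']).headD [])
      goA f elem ++ "[]".toList
    else if PySem.Chars.isIn ['['] t then
      -- base = t[:t.index("[")].strip()
      let base := PySem.Chars.strip (t.take (PySem.Chars.find t ['[']).toNat)
      goA f base ++ "[]".toList
    else tmap.getD t t

def translate_type (t : String) : String := String.ofList (goA (t.toList.length + 1) t.toList)

-- ===== PORT B =====
-- the while loop: peel layers, counting them; returns the residual base type and the count
def goB : Nat → List Char → Nat → List Char × Nat
  | 0, t, c => (t, c)
  | f + 1, t, c =>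
    if PySem.Chars.startswith t "sequence<".toList then
      goB f (PySem.Chars.strip ((PySem.Chars.splitOn (rstripGt (t.drop 9)) [',']).headD [])) (c + 1)
    else if PySem.Chars.isIn ['['] t then
      goB f (PySem.Chars.strip (t.take (PySem.Chars.find t ['[']).toNat)) (c + 1)
    else (t, c)

def translate_type_alt (t : String) : String :=
  let r := goB (t.toList.length + 1) t.toList 0
  String.ofList (tmap.getD r.1 r.1 ++ (List.replicate r.2 "[]".toList).flatten)

-- ===== PRECONDITION & SPEC =====
def Spec_translate_type (t : String) (out : String) : Prop := out = translate_type_alt t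
instance (t : String) (out : String) : Decidable (Spec_translate_type t out) := by unfold Spec_translate_type; infer_instance

-- ===== CLAIM (what is proved, stated in full; the proofs are below) =====
def Claim_equal_translate_type : Prop := ∀ (t : String), Dom_translate_type t → Spec_translate_type t (translate_type t)

-- ===== LEMMAS AND PROOFS =====
lemma goB_shift (f : Nat) : ∀ (t : List Char) (c : Nat),
    goB f t c = ((goB f t 0).1, c + (goB f t 0).2) := by
  induction f with
  | zero => intro t c; simp [goB]
  | succ f ih =>
    intro t c
    simp only [goB]
    split_ifs with h1 h2
    · rw [ih _ (c + 1), ih _ 1]; simp; omega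
    · rw [ih _ (c + 1), ih _ 1]; simp; omega
    · simp

lemma goA_eq_goB (f : Nat) : ∀ (t : List Char),
    goA f t = tmap.getD (goB f t 0).1 (goB f t 0).1
              ++ (List.replicate (goB f t 0).2 "[]".toList).flatten := by
  induction f with
  | zero => intro t; simp [goA, goB]
  | succ f ih =>
    intro t
    simp only [goA, goB]
    split_ifs with h1 h2
    · rw [goB_shift f _ 1, ih]
      rw [Nat.add_comm, List.replicate_succ', List.flatten_append]; simp
    · rw [goB_shift f _ 1, ih]
      rw [Nat.add_comm, List.replicate_succ', List.flatten_append]; simp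
    · simp

-- ===== VERDICT (by name: the statement is the Claim_ definition above) =====
theorem translate_type_spec : Claim_equal_translate_type := by
  intro t _
  unfold Spec_translate_type translate_type translate_type_alt
  rw [goA_eq_goB]
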